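-- pv_equiv track=rewrite | github.com/KrzysztofSwedziol/ASD- | ASD zadania z egzaminów/Pretty Sort/Pretty Sort.py | count
-- ===== SOURCE A (Python) =====
-- def count(number):
--     tab = [0 for i in range(10)]
--     while number > 0:
--         curr_num = number%10
--         tab[curr_num] += 1
--         number=number//10
--     single = 0
--     multi = 0
--     for i in range(10):
--         if tab[i] > 1:
--             multi += 1
--         if tab[i] == 1:
--             single += 1
--
--     return single, multi
-- ===== SOURCE B (Python) =====
-- def count(number):
--     # Peel digits with %10 into a list, sort it, then count maximal runs:
--     # a run of length 1 -> single, longer -> multi.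
--     digits = []
--     while number > 0:
--         digits.append(number % 10)
--         number //= 10
--     digits.sort()
--     single = 0
--     multi = 0
--     while digits:
--         d = digits[0]
--         k = 1
--         while k < len(digits) and digits[k] == d:
--             k += 1
--         if k == 1:
--             single += 1
--         else:
--             multi += 1
--         digits = digits[k:]
--     return single, multi
-- ===== Notes on version B (the rewrite author's own statement) =====
-- stated objective: alternative
-- what changed: Replaces the fixed ten-slot histogram plus full-range rescan by collecting the peeled digits into a list, sorting it, and counting maximal runs of equal digits (run of length one -> single, longer -> multi).
import Mathlib
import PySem

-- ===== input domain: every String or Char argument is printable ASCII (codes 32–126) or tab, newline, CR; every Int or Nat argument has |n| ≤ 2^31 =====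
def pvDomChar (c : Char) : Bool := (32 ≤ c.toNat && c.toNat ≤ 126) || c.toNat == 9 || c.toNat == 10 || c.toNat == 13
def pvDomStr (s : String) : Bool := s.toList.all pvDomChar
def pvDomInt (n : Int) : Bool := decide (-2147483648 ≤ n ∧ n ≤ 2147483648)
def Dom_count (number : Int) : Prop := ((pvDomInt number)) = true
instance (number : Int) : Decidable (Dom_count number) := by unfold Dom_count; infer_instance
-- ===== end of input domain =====

-- B sorts the digit list and counts maximal runs instead of A's fixed histogram table plus rescan ("alternative"; same values everywhere).

-- termination helper for both digit-peeling loops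
theorem pvFdivLt (n : Int) (h : 0 < n) :
    (PySem.Int.floordiv n 10).toNat < n.toNat := by
  rw [PySem.Int.floordiv_eq_ediv_of_pos (by omega)]
  omega

-- ===== PORT A =====
-- while number > 0: tab[number % 10] += 1; number //= 10
def loopA (number : Int) (tab : List Int) : List Int :=
  if 0 < number then
    loopA (PySem.Int.floordiv number 10)
      (PySem.List.pySetD tab (PySem.Int.mod number 10)
        (PySem.List.pyGetD tab (PySem.Int.mod number 10) 0 + 1))
  else tab
termination_by number.toNat
decreasing_by exact pvFdivLt _ (by assumption)

def count (number : Int) : Int × Int :=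
  let tab := loopA number ((PySem.List.pyRange 0 10 1).map (fun _ => (0 : Int)))
  (PySem.List.pyRange 0 10 1).foldl
    (fun (sm : Int × Int) i =>
      let sm1 := if 1 < PySem.List.pyGetD tab i 0 then (sm.1, sm.2 + 1) else sm
      if PySem.List.pyGetD tab i 0 = 1 then (sm1.1 + 1, sm1.2) else sm1)
    (0, 0)

-- ===== PORT B =====
-- while number > 0: digits.append(number % 10); number //= 10
def loopB (number : Int) (ds : List Int) : List Int :=
  if 0 < number then
    loopB (PySem.Int.floordiv number 10) (ds ++ [PySem.Int.mod number 10])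
  else ds
termination_by number.toNat
decreasing_by exact pvFdivLt _ (by assumption)

-- the run-counting while loop: d = digits[0]; k scans the run; digits = digits[k:]
def runScan : List Int → Int → Int → Int × Int
  | [], single, multi => (single, multi)
  | d :: rest, single, multi =>
    let run := rest.takeWhile (fun x => x == d)
    let rest' := rest.dropWhile (fun x => x == d)
    if run.length + 1 = 1 then runScan rest' (single + 1) multi
    else runScan rest' single (multi + 1)
termination_by s => s.length
decreasing_by
  all_goals
    simp only [List.length_cons]
    exact Nat.lt_succ_of_le (List.length_dropWhile_le _ _)

def count_alt (number : Int) : Int × Int :=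
  let ds := loopB number []
  runScan (PySem.List.sorted ds (fun x => x) false) 0 0

-- ===== PRECONDITION & SPEC =====
def Spec_count (number : Int) (out : Int × Int) : Prop := out = count_alt number
instance (number : Int) (out : Int × Int) : Decidable (Spec_count number out) := by unfold Spec_count; infer_instance

-- ===== CLAIM (what is proved, stated in full; the proofs are below) =====
def Claim_equal_count : Prop := ∀ (number : Int), Dom_count number → Spec_count number (count number)

-- ===== LEMMAS AND PROOFS =====

-- the digit list both loops peel (B's loop started empty)
theorem digits_nil (n : Int) (h : ¬ 0 < n) : loopB n [] = [] := by
  rw [loopB]; simp [h]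

theorem loopB_append_aux : ∀ (k : Nat) (n : Int), n.toNat ≤ k → ∀ ds : List Int,
    loopB n ds = ds ++ loopB n [] := by
  intro k
  induction k with
  | zero =>
    intro n hn ds
    rw [digits_nil n (by omega), loopB]
    simp [show ¬ 0 < n by omega]
  | succ k ih =>
    intro n hn ds
    by_cases h : 0 < n
    · have hlt := pvFdivLt n h
      have h1 : loopB n ds = (ds ++ [PySem.Int.mod n 10]) ++ loopB (PySem.Int.floordiv n 10) [] := by
        rw [loopB, if_pos h, ih _ (by omega)]
      have h2 : loopB n [] = ([] ++ [PySem.Int.mod n 10]) ++ loopB (PySem.Int.floordiv n 10) [] := by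
        rw [loopB, if_pos h, ih _ (by omega)]
      rw [h1, h2]
      simp
    · rw [digits_nil n h, loopB]
      simp [h]

theorem digits_cons (n : Int) (h : 0 < n) :
    loopB n [] = PySem.Int.mod n 10 :: loopB (PySem.Int.floordiv n 10) [] := by
  rw [loopB, if_pos h, loopB_append_aux (PySem.Int.floordiv n 10).toNat _ le_rfl]
  simp

theorem mod10_bounds (n : Int) :
    0 ≤ PySem.Int.mod n 10 ∧ PySem.Int.mod n 10 < 10 := by
  rw [PySem.Int.mod_eq_emod_of_pos (by omega)]
  omega

theorem digits_mem : ∀ (k : Nat) (n : Int), n.toNat ≤ k →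
    ∀ x ∈ loopB n [], 0 ≤ x ∧ x < 10 := by
  intro k
  induction k with
  | zero =>
    intro n hn x hx
    rw [digits_nil n (by omega)] at hx
    simp at hx
  | succ k ih =>
    intro n hn x hx
    by_cases h : 0 < n
    · rw [digits_cons n h] at hx
      rcases List.mem_cons.mp hx with h1 | h2
      · subst h1; exact mod10_bounds n
      · exact ih _ (by have := pvFdivLt n h; omega) x h2
    · rw [digits_nil n h] at hx
      simp at hx

-- A's table is the histogram of the digit list
theorem loopA_hist : ∀ (k : Nat) (n : Int), n.toNat ≤ k → ∀ tab : List Int, tab.length = 10 →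
    (loopA n tab).length = 10 ∧ ∀ i : Int, 0 ≤ i → i < 10 →
      PySem.List.pyGetD (loopA n tab) i 0
        = PySem.List.pyGetD tab i 0 + ((loopB n []).count i : Int) := by
  intro k
  induction k with
  | zero =>
    intro n hn tab htab
    rw [loopA]
    simp only [show ¬ 0 < n by omega, if_false]
    refine ⟨htab, ?_⟩
    intro i _ _
    rw [digits_nil n (by omega)]
    simp
  | succ k ih =>
    intro n hn tab htab
    by_cases h : 0 < n
    · rw [loopA, if_pos h]
      set m := PySem.Int.mod n 10 with hm
      have hmB := mod10_bounds n
      have hmnn : (0:Int) ≤ m := hmB.1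
      set v := PySem.List.pyGetD tab m 0 + 1 with hv
      have hlen' : (PySem.List.pySetD tab m v).length = 10 := by
        rw [PySem.List.length_pySetD, htab]
      have hlt := pvFdivLt n h
      obtain ⟨hL, hG⟩ := ih (PySem.Int.floordiv n 10) (by omega) _ hlen'
      refine ⟨hL, ?_⟩
      intro i hi0 hi10
      rw [hG i hi0 hi10, digits_cons n h]
      have hset : PySem.List.pyGetD (PySem.List.pySetD tab m v) i 0
          = if i = m then v else PySem.List.pyGetD tab i 0 := by
        have hmc : m = ((m.toNat : Nat) : Int) := by omega
        have hic : i = ((i.toNat : Nat) : Int) := by omega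
        rw [hmc, hic, PySem.List.pyGetD_pySetD_natCast tab m.toNat i.toNat v 0 (by omega)]
        by_cases hh : i.toNat = m.toNat
        · rw [if_pos hh, if_pos (show ((i.toNat : Nat) : Int) = ((m.toNat : Nat) : Int) by exact_mod_cast hh)]
        · rw [if_neg hh, if_neg (show ¬ ((i.toNat : Nat) : Int) = ((m.toNat : Nat) : Int) by exact_mod_cast hh)]
      rw [hset]
      simp only [List.count_cons, ← hm]
      by_cases he : i = m
      · subst he
        rw [if_pos rfl, hv]
        simp only [beq_self_eq_true, if_true]
        push_cast
        ring
      · have hbe : (m == i) = false := by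
          simp [beq_eq_false_iff_ne]
          exact fun hh => he hh.symm
        rw [if_neg he]
        simp only [hbe]
        push_cast
        ring
    · rw [loopA]
      simp only [h, if_false]
      refine ⟨htab, ?_⟩
      intro i _ _
      rw [digits_nil n h]
      simp

-- A's range(10) scan is a pair of countP's
theorem foldl_two_counts (f : Int → Int) (l : List Int) : ∀ a b : Int,
    l.foldl (fun (sm : Int × Int) i =>
        let sm1 := if 1 < f i then (sm.1, sm.2 + 1) else sm
        if f i = 1 then (sm1.1 + 1, sm1.2) else sm1) (a, b)
      = (a + (l.countP (fun i => decide (f i = 1)) : Int),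
         b + (l.countP (fun i => decide (1 < f i)) : Int)) := by
  induction l with
  | nil => intro a b; simp
  | cons x t ih =>
    intro a b
    simp only [List.foldl_cons, List.countP_cons]
    by_cases h1 : f x = 1
    · have h2 : ¬ 1 < f x := by omega
      simp only [h1, if_false, decide_true, decide_false, lt_irrefl]
      rw [ih]
      refine Prod.ext ?_ ?_ <;> simp <;> omega
    · by_cases h2 : 1 < f x
      · simp only [decide_true, decide_false, h1, h2]
        rw [ih]
        refine Prod.ext ?_ ?_ <;> simp <;> omega
      · simp only [h1, h2, decide_false]
        rw [ih]
        simp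


-- head of a dropWhile fails the predicate
theorem dropWhile_head_false {α : Type} (p : α → Bool) :
    ∀ (l : List α) (e : α) (t : List α), l.dropWhile p = e :: t → p e = false := by
  intro l
  induction l with
  | nil => intro e t h; simp [List.dropWhile] at h
  | cons x xs ih =>
    intro e t h
    by_cases hp : p x = true
    · rw [List.dropWhile_cons_of_pos hp] at h
      exact ih e t h
    · rw [List.dropWhile_cons_of_neg hp] at h
      cases h
      simpa using hp

-- B's run loop counts, per distinct value, multiplicity 1 vs > 1 (on a sorted list)
theorem runScan_eq : ∀ (k : Nat) (s : List Int), s.length ≤ k → s.Pairwise (· ≤ ·) →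
    ∀ a b : Int,
      runScan s a b
        = (a + ((s.toFinset.filter (fun e => s.count e = 1)).card : Int),
           b + ((s.toFinset.filter (fun e => 1 < s.count e)).card : Int)) := by
  intro k
  induction k with
  | zero =>
    intro s hs _ a b
    have : s = [] := List.eq_nil_of_length_eq_zero (by omega)
    subst this
    rw [runScan]
    simp
  | succ k ih =>
    intro s hs hpw a b
    match s, hs, hpw with
    | [], _, _ => rw [runScan]; simp
    | d :: rest, hs, hpw =>
      rw [runScan]
      set run := rest.takeWhile (fun x => x == d) with hrun
      set rest' := rest.dropWhile (fun x => x == d) with hrest'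
      have hsplit : run ++ rest' = rest := List.takeWhile_append_dropWhile
      have hrun_all : ∀ x ∈ run, x = d := by
        intro x hx
        have := List.mem_takeWhile_imp hx
        simpa using this
      have hdle : ∀ x ∈ rest, d ≤ x := (List.pairwise_cons.mp hpw).1
      have hpwrest : rest.Pairwise (· ≤ ·) := (List.pairwise_cons.mp hpw).2
      have hpwrest' : rest'.Pairwise (· ≤ ·) :=
        hpwrest.sublist (List.dropWhile_sublist _)
      have hsub' : ∀ x ∈ rest', x ∈ rest := fun x hx =>
        (List.dropWhile_sublist _).mem hx
      have hdnot : d ∉ rest' := by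
        intro hd
        have hnn : rest' ≠ [] := fun hh => by simp [hh] at hd
        obtain ⟨e, t, hr⟩ := List.exists_cons_of_ne_nil hnn
        have hef : (e == d) = false :=
          dropWhile_head_false _ rest e t (hrest'.symm.trans hr)
        have hne : e ≠ d := by simpa using hef
        have hde : d ≤ e := hdle e (hsub' e (by rw [hr]; exact List.mem_cons_self))
        have hlt : d < e := lt_of_le_of_ne hde (fun hh => hne hh.symm)
        rw [hr] at hd hpwrest'
        rcases List.mem_cons.mp hd with h1 | h2
        · omega
        · have : e ≤ d := (List.pairwise_cons.mp hpwrest').1 d h2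
          omega
      have hcount_d : (d :: rest).count d = run.length + 1 := by
        rw [← hsplit]
        simp only [List.count_cons, List.count_append, beq_self_eq_true, if_true]
        rw [List.count_eq_zero.mpr hdnot,
            List.count_eq_length.mpr (fun b hb => (hrun_all b hb).symm)]
      have hcount_e : ∀ e, e ≠ d → (d :: rest).count e = rest'.count e := by
        intro e he
        rw [← hsplit]
        simp only [List.count_cons, List.count_append]
        rw [List.count_eq_zero.mpr (fun hh => he (hrun_all e hh))]
        simp [show (d == e) = false by simpa using fun hh => he hh.symm]
      have hfin : (d :: rest).toFinset = insert d rest'.toFinset := by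
        ext x
        simp only [List.mem_toFinset, Finset.mem_insert, List.mem_cons, ← hsplit,
          List.mem_append]
        constructor
        · rintro (h1 | h2 | h3)
          · exact Or.inl h1
          · exact Or.inl (hrun_all x h2)
          · exact Or.inr (by simpa using h3)
        · rintro (h1 | h2)
          · exact Or.inl h1
          · exact Or.inr (Or.inr (by simpa using h2))
      have hdnotfin : d ∉ rest'.toFinset := by simpa using hdnot
      have hcard1 : ((d :: rest).toFinset.filter (fun e => (d :: rest).count e = 1)).card
          = (if run.length = 0 then 1 else 0)
            + (rest'.toFinset.filter (fun e => rest'.count e = 1)).card := by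
        rw [hfin, Finset.filter_insert,
          Finset.filter_congr (fun x hx => by
            rw [hcount_e x (fun hh => hdnotfin (hh ▸ hx))])]
        by_cases hc : (d :: rest).count d = 1
        · rw [if_pos hc, Finset.card_insert_of_notMem (fun hh => hdnotfin (Finset.mem_of_mem_filter _ hh))]
          rw [hcount_d] at hc
          rw [if_pos (by omega)]
          omega
        · rw [if_neg hc]
          rw [hcount_d] at hc
          rw [if_neg (by omega)]
          omega
      have hcard2 : ((d :: rest).toFinset.filter (fun e => 1 < (d :: rest).count e)).card
          = (if run.length = 0 then 0 else 1)
            + (rest'.toFinset.filter (fun e => 1 < rest'.count e)).card := by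
        rw [hfin, Finset.filter_insert,
          Finset.filter_congr (fun x hx => by
            rw [hcount_e x (fun hh => hdnotfin (hh ▸ hx))])]
        by_cases hc : 1 < (d :: rest).count d
        · rw [if_pos hc, Finset.card_insert_of_notMem (fun hh => hdnotfin (Finset.mem_of_mem_filter _ hh))]
          rw [hcount_d] at hc
          rw [if_neg (by omega)]
          omega
        · rw [if_neg hc]
          rw [hcount_d] at hc
          rw [if_pos (by omega)]
          omega
      have hlen' : rest'.length ≤ k := by
        have h1 := List.length_dropWhile_le (fun x => x == d) rest
        have h2 : rest'.length = (List.dropWhile (fun x => x == d) rest).length := by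
          rw [hrest']
        simp only [List.length_cons] at hs
        omega
      by_cases hz : run.length = 0
      · rw [if_pos (by omega), ih rest' hlen' hpwrest']
        rw [hcard1, hcard2, if_pos hz, if_pos hz]
        refine Prod.ext ?_ ?_ <;> simp <;> omega
      · rw [if_neg (by omega), ih rest' hlen' hpwrest']
        rw [hcard1, hcard2, if_neg hz, if_neg hz]
        refine Prod.ext ?_ ?_ <;> simp <;> omega

-- countP over range(10) = cardinality of the distinct-digit filter
theorem countP_range_eq_card (ds : List Int) (p : Int → Prop) [DecidablePred p]
    (hmem : ∀ e, p e → e ∈ ds) (hds : ∀ x ∈ ds, 0 ≤ x ∧ x < 10) :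
    (PySem.List.pyRange 0 10 1).countP (fun i => decide (p i))
      = (ds.toFinset.filter p).card := by
  rw [List.countP_eq_length_filter,
      ← List.toFinset_card_of_nodup ((PySem.List.nodup_pyRange_one 0 10).filter _),
      List.toFinset_filter]
  congr 1
  ext x
  simp only [Finset.mem_filter, List.mem_toFinset, PySem.List.mem_pyRange_one, decide_eq_true_eq]
  constructor
  · rintro ⟨_, hp⟩
    exact ⟨hmem x hp, hp⟩
  · rintro ⟨hx, hp⟩
    exact ⟨⟨(hds x hx).1, (hds x hx).2⟩, hp⟩

-- A's value, expressed through the digit list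
theorem countA_eq (n : Int) :
    count n = ((((loopB n []).toFinset.filter (fun e => (loopB n []).count e = 1)).card : Int),
               (((loopB n []).toFinset.filter (fun e => 1 < (loopB n []).count e)).card : Int)) := by
  simp only [count]
  set tab0 := (PySem.List.pyRange 0 10 1).map (fun _ => (0:Int)) with htab0
  have hlen0 : tab0.length = 10 := by
    rw [htab0, List.length_map, PySem.List.length_pyRange_one]
    decide
  obtain ⟨hL, hG⟩ := loopA_hist n.toNat n le_rfl tab0 hlen0
  set ds := loopB n [] with hds
  have hf : ∀ i : Int, 0 ≤ i → i < 10 →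
      PySem.List.pyGetD (loopA n tab0) i 0 = (ds.count i : Int) := by
    intro i h0 h1
    rw [hG i h0 h1, htab0, PySem.List.pyGetD_map_pyRange_of_nonneg (fun _ => (0:Int)) 10 i 0 h0 h1]
    simp
  rw [foldl_two_counts (fun i => PySem.List.pyGetD (loopA n tab0) i 0) _ 0 0]
  have hb : ∀ x ∈ ds, 0 ≤ x ∧ x < 10 := digits_mem n.toNat n le_rfl
  have hP1 : (PySem.List.pyRange 0 10 1).countP
        (fun i => decide (PySem.List.pyGetD (loopA n tab0) i 0 = 1))
      = (PySem.List.pyRange 0 10 1).countP (fun i => decide (ds.count i = 1)) := by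
    refine List.countP_congr (fun x hx => ?_)
    have hxx := PySem.List.mem_pyRange_one.mp hx
    rw [hf x hxx.1 hxx.2]
    simp [Nat.cast_eq_one]
  have hP2 : (PySem.List.pyRange 0 10 1).countP
        (fun i => decide (1 < PySem.List.pyGetD (loopA n tab0) i 0))
      = (PySem.List.pyRange 0 10 1).countP (fun i => decide (1 < ds.count i)) := by
    refine List.countP_congr (fun x hx => ?_)
    have hxx := PySem.List.mem_pyRange_one.mp hx
    rw [hf x hxx.1 hxx.2]
    simp [Nat.one_lt_cast]
  rw [hP1, hP2,
      countP_range_eq_card ds (fun i => ds.count i = 1)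
        (fun e he => List.count_pos_iff.mp (by omega)) hb,
      countP_range_eq_card ds (fun i => 1 < ds.count i)
        (fun e he => List.count_pos_iff.mp (by omega)) hb]
  simp

-- B's value, expressed through the digit list
theorem countB_eq (n : Int) :
    count_alt n = ((((loopB n []).toFinset.filter (fun e => (loopB n []).count e = 1)).card : Int),
                   (((loopB n []).toFinset.filter (fun e => 1 < (loopB n []).count e)).card : Int)) := by
  simp only [count_alt]
  set ds := loopB n [] with hds
  set sl := PySem.List.sorted ds (fun x => x) false with hsl
  have hperm : sl.Perm ds := PySem.List.sorted_perm ds (fun x => x) false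
  have hpw : sl.Pairwise (· ≤ ·) := by
    have := PySem.List.sorted_pairwise ds (fun x => x)
    simpa using this
  rw [runScan_eq sl.length sl le_rfl hpw 0 0]
  have hfin : sl.toFinset = ds.toFinset := List.toFinset_eq_of_perm _ _ hperm
  have hcnt : ∀ e : Int, sl.count e = ds.count e := hperm.count_eq
  rw [hfin,
      Finset.filter_congr (fun x _ => by rw [hcnt x] : ∀ x ∈ ds.toFinset,
        sl.count x = 1 ↔ ds.count x = 1),
      Finset.filter_congr (fun x _ => by rw [hcnt x] : ∀ x ∈ ds.toFinset,
        1 < sl.count x ↔ 1 < ds.count x)]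
  simp

-- ===== VERDICT (by name: the statement is the Claim_ definition above) =====
theorem count_spec : Claim_equal_count := by
  intro number _
  unfold Spec_count
  rw [countA_eq, countB_eq]
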